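-- pv_equiv track=rewrite | github.com/JulesSG/Basic_polynomial_calculator | main.py | ordenarPoli
-- ===== SOURCE A (Python) =====
-- def ordenarPoli(poli): # Esta funcion ordena los polinomios de manera decendiente segun su grado
--     for i in range(len(poli)-1):
--         for j in range((len(poli)-1)):
--             if int(poli[j + 1][0]) > int(poli[j][0]):
--                 aux = poli[j]
--                 poli[j] = poli[j + 1]
--                 poli[j + 1] = aux
--     return poli
-- ===== SOURCE B (Python) =====
-- def ordenarPoli(poli):
--     # Insertion sort: build the descending-by-degree result by inserting each term
--     # before the first strictly smaller degree (stable, like A); then write it back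
--     # into poli so the argument is mutated in place as A does.
--     res = []
--     for term in poli:
--         i = 0
--         while i < len(res) and int(res[i][0]) >= int(term[0]):
--             i += 1
--         res.insert(i, term)
--     poli[:] = res
--     return poli
-- ===== Notes on version B (the rewrite author's own statement) =====
-- stated objective: alternative
-- what changed: A's fixed (n-1)x(n-1) bubble-sort pass schedule with adjacent swaps is replaced by a single left-to-right insertion sort into a growing descending-sorted prefix (stable, same tie order); B also mutates poli in place to the same content.
import Mathlib
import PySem

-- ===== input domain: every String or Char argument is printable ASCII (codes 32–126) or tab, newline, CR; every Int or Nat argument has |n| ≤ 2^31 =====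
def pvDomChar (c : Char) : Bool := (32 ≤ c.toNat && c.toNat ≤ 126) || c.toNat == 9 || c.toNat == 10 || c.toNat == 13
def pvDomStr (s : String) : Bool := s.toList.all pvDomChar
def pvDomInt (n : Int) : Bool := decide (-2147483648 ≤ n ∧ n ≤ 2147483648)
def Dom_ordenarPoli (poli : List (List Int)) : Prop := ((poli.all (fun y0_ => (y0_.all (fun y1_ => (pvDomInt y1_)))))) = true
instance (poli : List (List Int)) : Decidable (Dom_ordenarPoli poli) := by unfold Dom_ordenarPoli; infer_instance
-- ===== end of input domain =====

-- B replaces A's fixed (n-1)×(n-1) bubble-sort pass schedule by a single left-to-right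
-- insertion sort into a growing sorted prefix (same stable descending order by degree).
-- Both A and B mutate the argument list in place to the same final content; the theorem
-- below is about the RETURN value.

-- ===== PORT A =====
-- int(t[0]): the terms are lists of ints, so int() is the identity; t[0] is
-- PySem.List.pyGet? t 0 (none = IndexError, excluded by Pre_; the .getD 0 is unreachable there)
def pvKey (t : List Int) : Int := (PySem.List.pyGet? t 0).getD 0

def pvInner (l : List (List Int)) (j : Int) : List (List Int) :=
  let a := PySem.List.pyGetD l j []
  let b := PySem.List.pyGetD l (j + 1) []
  if pvKey b > pvKey a then (l.set j.toNat b).set (j + 1).toNat a else l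

def ordenarPoli (poli : List (List Int)) : List (List Int) :=
  (PySem.List.pyRange 0 ((poli.length : Int) - 1)).foldl
    (fun acc _ => (PySem.List.pyRange 0 ((poli.length : Int) - 1)).foldl pvInner acc)
    poli

-- ===== PORT B =====
-- Source B's inner while+insert: keep the prefix with degree ≥ term's, insert the term there
def pvIns (x : List Int) : List (List Int) → List (List Int)
  | [] => [x]
  | y :: ys => if pvKey y ≥ pvKey x then y :: pvIns x ys else x :: y :: ys

def ordenarPoli_alt (poli : List (List Int)) : List (List Int) :=
  poli.foldl (fun res term => pvIns term res) []

-- ===== PRECONDITION & SPEC =====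
-- Pre_ excludes exactly the inputs on which the Python A raises IndexError reading t[0]:
-- a list of ≥ 2 terms one of which is the empty list (with ≤ 1 terms no index is read).
def Pre_ordenarPoli (poli : List (List Int)) : Prop :=
  poli.length ≤ 1 ∨ ∀ t ∈ poli, t ≠ []
instance (poli : List (List Int)) : Decidable (Pre_ordenarPoli poli) := by
  unfold Pre_ordenarPoli; infer_instance

def pvWitness_ordenarPoli : List (List Int) := [[1, 2], [3, 0], [1, 5]]

def Spec_ordenarPoli (poli : List (List Int)) (out : List (List Int)) : Prop := out = ordenarPoli_alt poli
instance (poli : List (List Int)) (out : List (List Int)) : Decidable (Spec_ordenarPoli poli out) := by unfold Spec_ordenarPoli; infer_instance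

-- ===== CLAIM (what is proved, stated in full; the proofs are below) =====
def Claim_equal_ordenarPoli : Prop := ∀ (poli : List (List Int)), Dom_ordenarPoli poli → Pre_ordenarPoli poli → Spec_ordenarPoli poli (ordenarPoli poli)

-- ===== LEMMAS AND PROOFS =====
-- descending order by degree
def pvDesc (a b : List Int) : Prop := pvKey b ≤ pvKey a

def pvPass : List (List Int) → List (List Int)
  | [] => []
  | [a] => [a]
  | a :: b :: t => if pvKey b > pvKey a then b :: pvPass (a :: t) else a :: pvPass (b :: t)
termination_by l => l.length
decreasing_by all_goals simp

theorem pvInner_succ (x : List Int) (l : List (List Int)) (j : Nat) :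
    pvInner (x :: l) ((j : Int) + 1) = x :: pvInner l (j : Int) := by
  have h1 : ((j : Int) + 1) = ((j + 1 : Nat) : Int) := by push_cast; ring
  rw [pvInner, pvInner, h1]
  have h2 : ((j + 1 : Nat) : Int) + 1 = ((j + 2 : Nat) : Int) := by push_cast; ring
  rw [h2]
  simp only [PySem.List.pyGetD_natCast, Int.toNat_natCast]
  simp [List.getD]
  split <;> rfl

theorem pvInner_zero (a b : List Int) (t : List (List Int)) :
    pvInner (a :: b :: t) 0 = if pvKey b > pvKey a then b :: a :: t else a :: b :: t := by
  simp [pvInner, PySem.List.pyGetD, PySem.List.pyGet?, PySem.List.pyIdx?,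
    show (0:Int) ≤ (t.length:Int)+1 from by positivity]

theorem foldl_pvInner_map_succ (r : List Nat) (x : List Int) (rest : List (List Int)) :
    (r.map Nat.succ).foldl (fun acc (j : Nat) => pvInner acc (j : Int)) (x :: rest)
      = x :: r.foldl (fun acc (j : Nat) => pvInner acc (j : Int)) rest := by
  induction r generalizing rest with
  | nil => rfl
  | cons j r ih =>
      simp only [List.map_cons, List.foldl_cons]
      have : ((Nat.succ j : Nat) : Int) = (j : Int) + 1 := by push_cast; ring
      rw [this, pvInner_succ, ih]

theorem pvPass_length (l : List (List Int)) : (pvPass l).length = l.length := by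
  induction l using pvPass.induct with
  | case1 => simp [pvPass]
  | case2 a => simp [pvPass]
  | case3 a b t h ih => rw [pvPass]; simp [h]; simpa using ih
  | case4 a b t h ih => rw [pvPass]; simp [h]; simpa using ih

theorem foldl_pvInner_range (l : List (List Int)) :
    (List.range (l.length - 1)).foldl (fun acc (j : Nat) => pvInner acc (j : Int)) l = pvPass l := by
  induction l using pvPass.induct with
  | case1 => simp [pvPass]
  | case2 a => simp [pvPass]
  | case3 a b t h ih =>
      have hlen : (a :: b :: t).length - 1 = t.length + 1 := by simp
      rw [hlen, List.range_succ_eq_map, List.foldl_cons]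
      have h0 : ((0 : Nat) : Int) = 0 := rfl
      rw [h0, pvInner_zero, if_pos h, foldl_pvInner_map_succ, pvPass, if_pos h]
      have : ((a :: t).length - 1) = t.length := by simp
      rw [this] at ih
      rw [ih]
  | case4 a b t h ih =>
      have hlen : (a :: b :: t).length - 1 = t.length + 1 := by simp
      rw [hlen, List.range_succ_eq_map, List.foldl_cons]
      have h0 : ((0 : Nat) : Int) = 0 := rfl
      rw [h0, pvInner_zero, if_neg h, foldl_pvInner_map_succ, pvPass, if_neg h]
      have : ((b :: t).length - 1) = t.length := by simp
      rw [this] at ih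
      rw [ih]

theorem foldl_pvInner (l : List (List Int)) :
    (PySem.List.pyRange 0 ((l.length : Int) - 1)).foldl pvInner l = pvPass l := by
  cases l with
  | nil => norm_num [PySem.List.pyRange, pvPass]
  | cons x t =>
      have h1 : ((x :: t).length : Int) - 1 = ((t.length : Nat) : Int) := by simp
      rw [h1, PySem.List.pyRange_zero_natCast, List.foldl_map]
      have := foldl_pvInner_range (x :: t)
      simpa using this

theorem pvPass_of_pairwise (l : List (List Int)) (h : l.Pairwise pvDesc) : pvPass l = l := by
  induction l using pvPass.induct with
  | case1 => simp [pvPass]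
  | case2 a => simp [pvPass]
  | case3 a b t hc ih =>
      exfalso
      have : pvDesc a b := (List.pairwise_cons.mp h).1 b (by simp)
      exact absurd hc (not_lt.mpr this)
  | case4 a b t hc ih =>
      rw [pvPass, if_neg hc]
      have h' : (b :: t).Pairwise pvDesc := (List.pairwise_cons.mp h).2
      rw [ih h']

theorem pvPass_append : ∀ (u v : List (List Int)), u ≠ [] → v.Pairwise pvDesc →
    (∀ a ∈ u, ∀ b ∈ v, pvKey b ≤ pvKey a) →
    ∃ u₂ m, pvPass (u ++ v) = u₂ ++ m :: v ∧ m ∈ u ∧ (∀ x ∈ u₂, x ∈ u) ∧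
      (∀ z ∈ u, pvKey m ≤ pvKey z) ∧ u₂.length + 1 = u.length
  | [], _, hu, _, _ => absurd rfl hu
  | [a], v, _, hv, hcross => by
      refine ⟨[], a, ?_, by simp, by simp, by simp, by simp⟩
      have : ((a :: v) : List (List Int)).Pairwise pvDesc :=
        List.pairwise_cons.mpr ⟨fun b hb => hcross a (by simp) b hb, hv⟩
      simpa using pvPass_of_pairwise (a :: v) this
  | a :: b :: u'', v, _, hv, hcross => by
      -- case split on the swap
      by_cases hc : pvKey b > pvKey a
      · -- swapped: head b, recurse on a :: u''
        have hrec := pvPass_append (a :: u'') v (by simp) hv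
          (fun z hz w hw => hcross z (by simp at hz ⊢; tauto) w hw)
        obtain ⟨u₂, m, heq, hm, hsub, hmin, hlen⟩ := hrec
        refine ⟨b :: u₂, m, ?_, ?_, ?_, ?_, ?_⟩
        · have : pvPass ((a :: b :: u'') ++ v) = b :: pvPass ((a :: u'') ++ v) := by
            cases u'' with
            | nil => rw [List.cons_append, List.cons_append, pvPass]; simp [hc]
            | cons c u₃ => rw [List.cons_append, List.cons_append, pvPass]; simp [hc]
          rw [this, heq]; simp
        · simp at hm ⊢; tauto
        · intro x hx; simp at hx ⊢
          rcases hx with h | h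
          · tauto
          · have := hsub x (by simpa using h); simp at this; tauto
        · intro z hz; simp at hz
          rcases hz with h | h | h
          · exact hmin z (by simp [h])
          · subst h; calc pvKey m ≤ pvKey a := hmin a (by simp)
              _ ≤ pvKey z := le_of_lt hc
          · exact hmin z (by simp [h])
        · simp at hlen ⊢; omega
      · -- not swapped: head a, recurse on b :: u''
        have hrec := pvPass_append (b :: u'') v (by simp) hv
          (fun z hz w hw => hcross z (by simp at hz ⊢; tauto) w hw)
        obtain ⟨u₂, m, heq, hm, hsub, hmin, hlen⟩ := hrec
        refine ⟨a :: u₂, m, ?_, ?_, ?_, ?_, ?_⟩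
        · have : pvPass ((a :: b :: u'') ++ v) = a :: pvPass ((b :: u'') ++ v) := by
            cases u'' with
            | nil => rw [List.cons_append, List.cons_append, pvPass]; simp [hc]
            | cons c u₃ => rw [List.cons_append, List.cons_append, pvPass]; simp [hc]
          rw [this, heq]; simp
        · simp at hm ⊢; tauto
        · intro x hx; simp at hx ⊢
          rcases hx with h | h
          · tauto
          · have := hsub x (by simpa using h); simp at this; tauto
        · intro z hz; simp at hz
          rcases hz with h | h | h
          · subst h; calc pvKey m ≤ pvKey b := hmin b (by simp)
              _ ≤ pvKey z := not_lt.mp hc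
          · exact hmin z (by simp [h])
          · exact hmin z (by simp [h])
        · simp at hlen ⊢; omega
termination_by u _ _ _ _ => u.length

theorem pvPass_iterate (r : Nat) (l : List (List Int)) :
    ∃ u v, pvPass^[r] l = u ++ v ∧ v.Pairwise pvDesc ∧
      (∀ a ∈ u, ∀ b ∈ v, pvKey b ≤ pvKey a) ∧
      u.length + v.length = l.length ∧ u.length ≤ l.length - r := by
  induction r with
  | zero => exact ⟨l, [], by simp, by simp, by simp, by simp, by simp⟩
  | succ r ih =>
      obtain ⟨u, v, heq, hv, hcross, htot, hub⟩ := ih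
      rcases eq_or_ne u [] with hu | hu
      · refine ⟨[], v, ?_, hv, by simp, by simpa [hu] using htot, by simp⟩
        rw [Function.iterate_succ_apply', heq, hu, List.nil_append,
          pvPass_of_pairwise v hv]
      · obtain ⟨u₂, m, heq2, hm, hsub, hmin, hlen⟩ := pvPass_append u v hu hv hcross
        refine ⟨u₂, m :: v, ?_, ?_, ?_, ?_, ?_⟩
        · rw [Function.iterate_succ_apply', heq, heq2]
        · exact List.pairwise_cons.mpr ⟨fun b hb => hcross m hm b hb, hv⟩
        · intro a ha b hb
          rcases List.mem_cons.mp hb with h | h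
          · subst h; exact hmin a (hsub a ha)
          · exact hcross a (hsub a ha) b h
        · simp at htot ⊢; omega
        · have h1 : u.length ≥ 1 := by
            cases u with | nil => exact absurd rfl hu | cons _ _ => simp
          omega

theorem pvPass_iterate_sorted (l : List (List Int)) :
    (pvPass^[l.length - 1] l).Pairwise pvDesc := by
  obtain ⟨u, v, heq, hv, hcross, htot, hub⟩ := pvPass_iterate (l.length - 1) l
  have hu1 : u.length ≤ 1 := by omega
  rw [heq]
  cases u with
  | nil => simpa using hv
  | cons x u' =>
      cases u' with
      | nil =>
          simpa using List.pairwise_cons.mpr ⟨fun b hb => hcross x (by simp) b hb, hv⟩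
      | cons y u'' => simp at hu1

theorem pvIns_comm (a b : List Int) (acc : List (List Int)) (h : pvKey a < pvKey b) :
    pvIns a (pvIns b acc) = pvIns b (pvIns a acc) := by
  induction acc with
  | nil => simp [pvIns, le_of_lt h, not_le.mpr h]
  | cons c cs ih =>
      by_cases hcb : pvKey c ≥ pvKey b
      · have hca : pvKey c ≥ pvKey a := le_trans (le_of_lt h) hcb
        simp [pvIns, hcb, hca, ih]
      · by_cases hca : pvKey c ≥ pvKey a
        · simp [pvIns, hcb, hca, le_of_lt h]
        · simp [pvIns, hcb, hca, le_of_lt h, not_le.mpr h]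

theorem foldl_pvIns_pass (l : List (List Int)) :
    ∀ acc, (pvPass l).foldl (fun res t => pvIns t res) acc
      = l.foldl (fun res t => pvIns t res) acc := by
  induction l using pvPass.induct with
  | case1 => intro acc; simp [pvPass]
  | case2 a => intro acc; simp [pvPass]
  | case3 a b t h ih =>
      intro acc
      rw [pvPass, if_pos h]
      simp only [List.foldl_cons]
      rw [ih (pvIns b acc), List.foldl_cons, pvIns_comm a b acc h]
  | case4 a b t h ih =>
      intro acc
      rw [pvPass, if_neg h]
      simp only [List.foldl_cons]
      rw [ih (pvIns a acc), List.foldl_cons]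

theorem pvIns_of_forall (x : List Int) (acc : List (List Int))
    (h : ∀ y ∈ acc, pvKey x ≤ pvKey y) : pvIns x acc = acc ++ [x] := by
  induction acc with
  | nil => simp [pvIns]
  | cons y ys ih =>
      have : pvKey y ≥ pvKey x := h y (by simp)
      simp [pvIns, this, ih (fun z hz => h z (by simp [hz]))]

theorem foldl_pvIns_of_pairwise (l : List (List Int)) :
    ∀ acc, (acc ++ l).Pairwise pvDesc →
      l.foldl (fun res t => pvIns t res) acc = acc ++ l := by
  induction l with
  | nil => intro acc _; simp
  | cons x l ih =>
      intro acc h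
      have hx : ∀ y ∈ acc, pvKey x ≤ pvKey y := by
        intro y hy
        have := (List.pairwise_append.mp h).2.2 y hy x (by simp)
        exact this
      rw [List.foldl_cons, pvIns_of_forall x acc hx]
      have h' : ((acc ++ [x]) ++ l).Pairwise pvDesc := by simpa using h
      rw [ih (acc ++ [x]) h']
      simp

theorem pvIter_length (r : Nat) (l : List (List Int)) :
    (pvPass^[r] l).length = l.length := by
  induction r with
  | zero => rfl
  | succ r ih => rw [Function.iterate_succ_apply', pvPass_length, ih]

theorem foldl_const {α β : Type} (r : List α) (F : β → β) (acc : β) :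
    r.foldl (fun a _ => F a) acc = F^[r.length] acc := by
  induction r generalizing acc with
  | nil => rfl
  | cons x r ih => rw [List.foldl_cons, List.length_cons, Function.iterate_succ_apply, ih]

theorem pyRange_len (n : Nat) :
    (PySem.List.pyRange 0 ((n : Int) - 1)).length = n - 1 := by
  cases n with
  | zero => norm_num [PySem.List.pyRange]
  | succ m =>
      have h1 : ((m + 1 : Nat) : Int) - 1 = ((m : Nat) : Int) := by push_cast; ring
      rw [h1, PySem.List.pyRange_zero_natCast]
      simp

theorem iterInner_eq (poli : List (List Int)) (r : Nat) :
    (fun acc => (PySem.List.pyRange 0 ((poli.length : Int) - 1)).foldl pvInner acc)^[r] poli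
      = pvPass^[r] poli := by
  induction r with
  | zero => rfl
  | succ r ih =>
      rw [Function.iterate_succ_apply', Function.iterate_succ_apply', ih]
      have hl : (pvPass^[r] poli).length = poli.length := pvIter_length r poli
      calc (PySem.List.pyRange 0 ((poli.length : Int) - 1)).foldl pvInner (pvPass^[r] poli)
          = (PySem.List.pyRange 0 (((pvPass^[r] poli).length : Int) - 1)).foldl pvInner (pvPass^[r] poli) := by rw [hl]
        _ = pvPass (pvPass^[r] poli) := foldl_pvInner _

theorem ordenarPoli_eq_iter (poli : List (List Int)) :
    ordenarPoli poli = pvPass^[poli.length - 1] poli := by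
  unfold ordenarPoli
  rw [foldl_const, pyRange_len, iterInner_eq]

theorem foldl_pvIns_iter (r : Nat) (l : List (List Int)) (acc : List (List Int)) :
    (pvPass^[r] l).foldl (fun res t => pvIns t res) acc
      = l.foldl (fun res t => pvIns t res) acc := by
  induction r with
  | zero => rfl
  | succ r ih => rw [Function.iterate_succ_apply', foldl_pvIns_pass, ih]

theorem main_eq (poli : List (List Int)) : ordenarPoli poli = ordenarPoli_alt poli := by
  rw [ordenarPoli_eq_iter]
  unfold ordenarPoli_alt
  rw [← foldl_pvIns_iter (poli.length - 1) poli []]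
  have hs := pvPass_iterate_sorted poli
  have := foldl_pvIns_of_pairwise (pvPass^[poli.length - 1] poli) [] (by simpa using hs)
  rw [this]
  simp

-- ===== VERDICT (by name: the statement is the Claim_ definition above) =====
theorem ordenarPoli_spec : Claim_equal_ordenarPoli := by
  intro poli _ _
  unfold Spec_ordenarPoli
  exact main_eq poli
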